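-- pv_equiv track=rewrite | github.com/CopotM/WP-workflow-ComputEL2022 | dump_wao.py | readSentences
-- ===== SOURCE A (Python) =====
-- def readSentences(fh):
--     curr = []
--     for line in fh:
--         words = line.strip().lower().split()
--         for wi in words:
--             curr.append(wi)
--             if wi == ".":
--                 yield curr
--                 curr = []
-- ===== SOURCE B (Python) =====
-- def readSentences(fh):
--     tokens = [w for line in fh for w in line.strip().lower().split()]
--     start = 0
--     for i in range(len(tokens)):
--         if tokens[i] == ".":
--             yield tokens[start:i + 1]
--             start = i + 1
-- ===== Notes on version B (the rewrite author's own statement) =====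
-- stated objective: alternative
-- what changed: B first materializes the flattened token list with one comprehension, then does a single index walk that slices out each sentence between a start cursor and each '.', replacing A's per-token accumulator that appends word by word.
import Mathlib
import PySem

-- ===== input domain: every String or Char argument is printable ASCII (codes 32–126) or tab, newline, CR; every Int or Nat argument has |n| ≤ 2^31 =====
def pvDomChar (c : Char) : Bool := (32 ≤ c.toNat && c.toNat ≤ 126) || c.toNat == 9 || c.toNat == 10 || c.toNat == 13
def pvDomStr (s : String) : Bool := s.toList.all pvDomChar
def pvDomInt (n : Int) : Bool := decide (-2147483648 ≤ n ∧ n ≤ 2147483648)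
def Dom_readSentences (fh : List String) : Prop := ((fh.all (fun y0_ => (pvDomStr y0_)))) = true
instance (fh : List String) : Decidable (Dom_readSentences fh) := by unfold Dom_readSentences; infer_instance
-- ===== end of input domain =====

-- B materializes the flattened token list and slices sentences at each '.' by index,
-- instead of A's per-token accumulator; return-value equivalence (A is a generator, collected as a list).

-- ===== PORT A =====
def readSentences (fh : List String) : List (List String) :=
  (fh.foldl
    (fun (st : List String × List (List String)) line =>
      (PySem.Str.split₀ (PySem.Str.lower (PySem.Str.strip line))).foldl
        (fun st wi =>
          let curr := st.1 ++ [wi]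
          if wi == "." then ([], st.2 ++ [curr]) else (curr, st.2))
        st)
    ([], [])).2

-- ===== PORT B =====
def readSentences_alt (fh : List String) : List (List String) :=
  let tokens := fh.flatMap (fun line => PySem.Str.split₀ (PySem.Str.lower (PySem.Str.strip line)))
  ((PySem.List.pyRange 0 (tokens.length : Int) 1).foldl
    (fun (st : Int × List (List String)) i =>
      if PySem.List.pyGetD tokens i "" == "." then
        (i + 1, st.2 ++ [PySem.List.slice tokens (some st.1) (some (i + 1))])
      else st)
    (0, [])).2

-- ===== PRECONDITION & SPEC =====
def Spec_readSentences (fh : List String) (out : List (List String)) : Prop := out = readSentences_alt fh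
instance (fh : List String) (out : List (List String)) : Decidable (Spec_readSentences fh out) := by unfold Spec_readSentences; infer_instance

-- ===== CLAIM (what is proved, stated in full; the proofs are below) =====
def Claim_equal_readSentences : Prop := ∀ (fh : List String), Dom_readSentences fh → Spec_readSentences fh (readSentences fh)

-- ===== LEMMAS AND PROOFS =====

-- tokenization of one line (proof abbreviation only; both ports spell it out)
def pvWords (line : String) : List String :=
  PySem.Str.split₀ (PySem.Str.lower (PySem.Str.strip line))

-- A's step on one word
def pvStepA (st : List String × List (List String)) (wi : String) : List String × List (List String) :=
  let curr := st.1 ++ [wi]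
  if wi == "." then ([], st.2 ++ [curr]) else (curr, st.2)

-- B's step on one index
def pvStepB (tokens : List String) (st : Int × List (List String)) (i : Int) : Int × List (List String) :=
  if PySem.List.pyGetD tokens i "" == "." then
    (i + 1, st.2 ++ [PySem.List.slice tokens (some st.1) (some (i + 1))])
  else st

lemma pv_slice_snoc (pre : List String) (t : String) (rest : List String) (s : Int)
    (h0 : 0 ≤ s) (hs : s.toNat ≤ pre.length) :
    PySem.List.slice (pre ++ t :: rest) (some s) (some ((pre.length : Int) + 1))
      = PySem.List.slice (pre ++ t :: rest) (some s) (some (pre.length : Int)) ++ [t] := by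
  rw [PySem.List.slice_toNat, PySem.List.slice_toNat]
  · rw [List.drop_append_of_le_length (by omega)]
    have h1 : ((pre.length : Int) + 1).toNat - s.toNat = (pre.length - s.toNat) + 1 := by omega
    have h2 : ((pre.length : Int)).toNat - s.toNat = pre.length - s.toNat := by omega
    rw [h1, h2]
    have h3 : pre.length - s.toNat = (pre.drop s.toNat).length := by simp
    rw [h3, List.take_append]
    simp
  all_goals positivity

lemma pv_slice_empty (xs : List String) (i : Int) (h0 : 0 ≤ i) :
    PySem.List.slice xs (some i) (some i) = [] := by
  rw [PySem.List.slice_toNat] <;> simp [h0]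

-- loop invariant: B's index walk from index pre.length with cursor s equals A's
-- accumulator walk over the remaining tokens, the accumulator being the slice [s, pre.length)
lemma pv_B_inv (rest : List String) : ∀ (pre : List String) (s : Int) (out : List (List String)),
    0 ≤ s → s.toNat ≤ pre.length →
    ((PySem.List.pyRange (pre.length : Int) (((pre ++ rest).length : Int)) 1).foldl
        (pvStepB (pre ++ rest)) (s, out)).2
      = (rest.foldl pvStepA (PySem.List.slice (pre ++ rest) (some s) (some (pre.length : Int)), out)).2 := by
  induction rest with
  | nil =>
    intro pre s out h0 hs
    rw [PySem.List.pyRange_one_eq_nil (by simp only [List.append_nil, le_refl])]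
    simp
  | cons t rest ih =>
    intro pre s out h0 hs
    have hlt : (pre.length : Int) < ((pre ++ t :: rest).length : Int) := by simp
    rw [PySem.List.pyRange_one_cons hlt]
    have hget : PySem.List.pyGetD (pre ++ t :: rest) (pre.length : Int) "" = t := by
      rw [PySem.List.pyGetD_eq_getElem]
      · simp
      · positivity
      · simp
    simp only [List.foldl_cons]
    by_cases hdot : t = "."
    · have hstep : pvStepB (pre ++ t :: rest) (s, out) (pre.length : Int)
          = ((pre.length : Int) + 1, out ++ [PySem.List.slice (pre ++ t :: rest) (some s) (some ((pre.length : Int) + 1))]) := by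
        simp [pvStepB, hdot]
      rw [hstep]
      have hA : pvStepA (PySem.List.slice (pre ++ t :: rest) (some s) (some (pre.length : Int)), out) t
          = ([], out ++ [PySem.List.slice (pre ++ t :: rest) (some s) (some ((pre.length : Int) + 1))]) := by
        simp [pvStepA, hdot]
        exact (pv_slice_snoc pre "." rest s h0 hs).symm
      rw [hA]
      have := ih (pre ++ [t]) ((pre.length : Int) + 1)
        (out ++ [PySem.List.slice (pre ++ t :: rest) (some s) (some ((pre.length : Int) + 1))])
        (by positivity) (by simp)
      simp only [List.append_assoc, List.singleton_append] at this
      rw [show ((pre ++ [t]).length : Int) = (pre.length : Int) + 1 by simp] at this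
      rw [this, pv_slice_empty _ _ (by positivity)]
    · have hstep : pvStepB (pre ++ t :: rest) (s, out) (pre.length : Int) = (s, out) := by
        simp [pvStepB, hget, hdot]
      rw [hstep]
      have hA : pvStepA (PySem.List.slice (pre ++ t :: rest) (some s) (some (pre.length : Int)), out) t
          = (PySem.List.slice (pre ++ t :: rest) (some s) (some ((pre.length : Int) + 1)), out) := by
        simp [pvStepA, hdot]
        exact (pv_slice_snoc pre t rest s h0 hs).symm
      rw [hA]
      have := ih (pre ++ [t]) s out h0 (by simp; omega)
      simp only [List.append_assoc, List.singleton_append] at this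
      rw [show ((pre ++ [t]).length : Int) = (pre.length : Int) + 1 by simp] at this
      rw [this]

theorem pv_main (fh : List String) : readSentences fh = readSentences_alt fh := by
  have hA : readSentences fh = ((fh.flatMap pvWords).foldl pvStepA ([], [])).2 :=
    congrArg Prod.snd (List.foldl_flatMap).symm
  have hB : readSentences_alt fh
      = ((PySem.List.pyRange 0 (((fh.flatMap pvWords).length : Int)) 1).foldl
          (pvStepB (fh.flatMap pvWords)) (0, [])).2 := rfl
  have key := pv_B_inv (fh.flatMap pvWords) [] 0 [] (le_refl 0) (by simp)
  simp only [List.nil_append, List.length_nil, Nat.cast_zero] at key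
  rw [hA, hB, key, pv_slice_empty _ _ (le_refl 0)]

-- ===== VERDICT (by name: the statement is the Claim_ definition above) =====
theorem readSentences_spec : Claim_equal_readSentences := by
  intro fh _
  exact pv_main fh
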